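-- pv_equiv track=rewrite | github.com/codewitty/InformationRetrieval | indexer.py | splitIndex
-- ===== SOURCE A (Python) =====
-- def splitIndex(index, chunks=50):
--     "Return list of split indexes"
--     return_list = [dict() for idx in range(chunks)]
--     idx = 0
--     for k,v in index.items():
--         return_list[idx][k] = v
--         if idx < chunks-1:  # indexes start at 0
--             idx += 1
--         else:
--             idx = 0
--     return return_list
-- ===== SOURCE B (Python) =====
-- def splitIndex(index, chunks=50):
--     "Return list of split indexes"
--     items = list(index.items())
--     return [dict(items[b::chunks]) for b in range(chunks)]
-- ===== Notes on version B (the rewrite author's own statement) =====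
-- stated objective: alternative
-- what changed: A fills the buckets in one item-by-item scatter pass driven by a resetting bucket counter; B is bucket-major: bucket b is built directly as the dict of the strided slice items[b::chunks].
import Mathlib
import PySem

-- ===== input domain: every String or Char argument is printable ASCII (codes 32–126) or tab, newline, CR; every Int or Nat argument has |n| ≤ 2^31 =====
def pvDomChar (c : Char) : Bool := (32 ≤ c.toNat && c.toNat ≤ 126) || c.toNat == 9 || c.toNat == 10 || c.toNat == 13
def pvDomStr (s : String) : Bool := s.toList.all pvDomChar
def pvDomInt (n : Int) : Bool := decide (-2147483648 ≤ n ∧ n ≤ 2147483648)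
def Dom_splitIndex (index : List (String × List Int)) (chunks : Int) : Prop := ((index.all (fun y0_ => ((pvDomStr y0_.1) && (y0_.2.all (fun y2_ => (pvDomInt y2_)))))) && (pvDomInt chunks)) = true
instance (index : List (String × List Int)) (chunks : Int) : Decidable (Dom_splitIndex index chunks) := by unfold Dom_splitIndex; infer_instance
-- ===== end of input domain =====

-- B replaces A's single scatter pass with a resetting bucket counter by a bucket-major
-- build: bucket b is the dict of the strided slice items[b::chunks].

-- ===== PORT A =====
def splitIndex (index : List (String × List Int)) (chunks : Int) : List (List (String × List Int)) :=
  -- return_list = [dict() for idx in range(chunks)]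
  let returnList : List (PySem.Dict String (List Int)) :=
    (PySem.List.pyRange 0 chunks 1).map (fun _ => PySem.Dict.empty)
  -- idx = 0; for k,v in index.items(): return_list[idx][k] = v; idx = idx+1 if idx < chunks-1 else 0
  let final := index.foldl
    (fun (st : List (PySem.Dict String (List Int)) × Int) kv =>
      (st.1.modify st.2.toNat (fun d => d.insert kv.1 kv.2),
       if st.2 < chunks - 1 then st.2 + 1 else 0))
    (returnList, 0)
  final.1.map PySem.Dict.items

-- ===== PORT B =====
def splitIndex_alt (index : List (String × List Int)) (chunks : Int) : List (List (String × List Int)) :=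
  -- items = list(index.items())
  let items := index
  -- [dict(items[b::chunks]) for b in range(chunks)]
  -- (slice? is none only for step = 0; the range is empty then, so the .getD [] is never reached)
  (PySem.List.pyRange 0 chunks 1).map (fun b =>
    (PySem.Dict.ofList ((PySem.List.slice? items (some b) none chunks).getD [])).items)

-- ===== PRECONDITION & SPEC =====
-- Pre_ excludes exactly the inputs where A raises IndexError: chunks ≤ 0 with a nonempty index
-- (return_list is empty, yet the loop assigns return_list[0]).
def Pre_splitIndex (index : List (String × List Int)) (chunks : Int) : Prop :=
  0 < chunks ∨ index = []
instance (index : List (String × List Int)) (chunks : Int) : Decidable (Pre_splitIndex index chunks) := by unfold Pre_splitIndex; infer_instance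

def pvWitness_splitIndex : (List (String × List Int)) × Int := ([("a", [1]), ("b", [2, 3])], 2)

def Spec_splitIndex (index : List (String × List Int)) (chunks : Int) (out : List (List (String × List Int))) : Prop := out = splitIndex_alt index chunks
instance (index : List (String × List Int)) (chunks : Int) (out : List (List (String × List Int))) : Decidable (Spec_splitIndex index chunks out) := by unfold Spec_splitIndex; infer_instance

-- ===== CLAIM (what is proved, stated in full; the proofs are below) =====
def Claim_equal_splitIndex : Prop := ∀ (index : List (String × List Int)) (chunks : Int), Dom_splitIndex index chunks → Pre_splitIndex index chunks → Spec_splitIndex index chunks (splitIndex index chunks)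

-- ===== LEMMAS AND PROOFS =====

-- the items of l at positions b, b + st, b + 2*st, …  (what the slice l[b::st] selects)
def stride {α : Type} : List α → Nat → Nat → List α
  | [], _, _ => []
  | x :: xs, b, st => if b = 0 then x :: stride xs (st - 1) st else stride xs (b - 1) st

-- dict(ps) inserted pair by pair into d
def insAll (d : PySem.Dict String (List Int)) (ps : List (String × List Int)) :
    PySem.Dict String (List Int) :=
  ps.foldl (fun d p => d.insert p.1 p.2) d

-- how far bucket j is ahead of A's counter idx, cyclically
def off (idx j n : Nat) : Nat := if idx ≤ j then j - idx else j + n - idx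

-- slice? l[b::st] for 0 ≤ b, 0 < st, written in the canonical shape of its definition
lemma slice?_closed {α : Type} (xs : List α) (b st : Int) (hb : 0 ≤ b) (hst : 0 < st) :
    PySem.List.slice? xs (some b) none st =
      some (List.filterMap (fun (k : Nat) => xs[(min b (xs.length : Int) + st * (k : Int)).toNat]?)
        (List.range (if min b (xs.length : Int) < (xs.length : Int)
          then (((xs.length : Int) - min b (xs.length : Int) + st - 1) / st).toNat else 0))) := by
  simp only [PySem.List.slice?, PySem.List.sliceIndices, hst.ne', if_false,
    (show ¬st < 0 by omega), (show ¬b < 0 by omega), if_pos hst]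

lemma slice?_nil {α : Type} (b st : Int) (hb : 0 ≤ b) (hst : 0 < st) :
    PySem.List.slice? ([] : List α) (some b) none st = some [] := by
  rw [slice?_closed _ _ _ hb hst]
  simp

lemma slice?_cons_pos {α : Type} (x : α) (xs : List α) (b st : Int) (hb : 0 < b) (hst : 0 < st) :
    PySem.List.slice? (x :: xs) (some b) none st
      = PySem.List.slice? xs (some (b - 1)) none st := by
  rw [slice?_closed _ _ _ (by omega) hst, slice?_closed _ _ _ (by omega) hst]
  simp only [List.length_cons, Nat.cast_add, Nat.cast_one]
  have hmin : min b ((xs.length : Int) + 1) = min (b - 1) (xs.length : Int) + 1 := by omega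
  rw [hmin]
  have hc : (min (b - 1) (xs.length : Int) + 1 < (xs.length : Int) + 1)
      ↔ (min (b - 1) (xs.length : Int) < (xs.length : Int)) := by omega
  have hn : (xs.length : Int) + 1 - (min (b - 1) (xs.length : Int) + 1)
      = (xs.length : Int) - min (b - 1) (xs.length : Int) := by ring
  simp only [hc, hn]
  congr 1
  apply List.filterMap_congr
  intro k hk
  have hknn : 0 ≤ st * (k : Int) := mul_nonneg hst.le (Int.natCast_nonneg k)
  have h1 : (min (b - 1) (xs.length : Int) + 1 + st * (k : Int)).toNat
      = (min (b - 1) (xs.length : Int) + st * (k : Int)).toNat + 1 := by omega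
  rw [h1, List.getElem?_cons_succ]

lemma slice?_cons_zero {α : Type} (x : α) (xs : List α) (st : Int) (hst : 0 < st) :
    PySem.List.slice? (x :: xs) (some 0) none st
      = (PySem.List.slice? xs (some (st - 1)) none st).map (fun l => x :: l) := by
  rw [slice?_closed _ _ _ le_rfl hst, slice?_closed _ _ _ (by omega) hst]
  simp only [List.length_cons, Nat.cast_add, Nat.cast_one, Option.map_some]
  have hmin0 : min (0 : Int) ((xs.length : Int) + 1) = 0 := by omega
  simp only [hmin0]
  have hcount : (((xs.length : Int) + 1 - 0 + st - 1) / st).toNat = ((xs.length : Int) / st).toNat + 1 := by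
    have h1 : (xs.length : Int) + 1 - 0 + st - 1 = (xs.length : Int) + 1 * st := by ring
    rw [h1, Int.add_mul_ediv_right _ _ hst.ne']
    have h2 : 0 ≤ (xs.length : Int) / st := Int.ediv_nonneg (by positivity) hst.le
    omega
  have hcount' : (if min (st - 1) (xs.length : Int) < (xs.length : Int)
      then (((xs.length : Int) - min (st - 1) (xs.length : Int) + st - 1) / st).toNat else 0)
      = ((xs.length : Int) / st).toNat := by
    by_cases h : st - 1 < (xs.length : Int)
    · have hm : min (st - 1) (xs.length : Int) = st - 1 := by omega
      rw [if_pos (by omega), hm]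
      congr 1
      have h1 : (xs.length : Int) - (st - 1) + st - 1 = ((xs.length : Int) - st) + 1 * st := by ring
      rw [h1, Int.add_mul_ediv_right _ _ hst.ne']
      have h2 := Int.add_mul_ediv_right ((xs.length : Int) - st) 1 hst.ne'
      have h3 : (xs.length : Int) - st + 1 * st = (xs.length : Int) := by ring
      rw [h3] at h2
      omega
    · rw [if_neg (by omega)]
      have : (xs.length : Int) / st = 0 := Int.ediv_eq_zero_of_lt (by positivity) (by omega)
      omega
  rw [if_pos (show (0:Int) < (xs.length : Int) + 1 by positivity), hcount, hcount',
    List.range_succ_eq_map, List.filterMap_cons, List.filterMap_map]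
  have hf0 : ((0 : Int) + st * ((0:Nat) : Int)).toNat = 0 := by simp
  simp only [hf0, List.getElem?_cons_zero]
  congr 1
  congr 1
  apply List.filterMap_congr
  intro k hk
  rw [List.mem_range] at hk
  have h1 : 1 ≤ (xs.length : Int) / st := by omega
  have h2 : st ≤ (xs.length : Int) := by
    have := (Int.le_ediv_iff_mul_le hst).mp h1
    omega
  have hm : min (st - 1) (xs.length : Int) = st - 1 := by omega
  have hi : ((0 : Int) + st * ((Nat.succ k : Nat) : Int)).toNat
      = (min (st - 1) (xs.length : Int) + st * (k : Int)).toNat + 1 := by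
    rw [hm]
    have : st * ((Nat.succ k : Nat) : Int) = (st - 1 + st * (k : Int)) + 1 := by push_cast; ring
    have hknn : 0 ≤ st * (k : Int) := mul_nonneg hst.le (Int.natCast_nonneg k)
    omega
  simp only [Function.comp_apply, hi, List.getElem?_cons_succ]

-- the slice l[b::st] is exactly stride
lemma slice?_eq_stride {α : Type} (xs : List α) (b st : Int) (hb : 0 ≤ b) (hst : 0 < st) :
    PySem.List.slice? xs (some b) none st = some (stride xs b.toNat st.toNat) := by
  induction xs generalizing b with
  | nil => rw [slice?_nil _ _ hb hst]; rfl
  | cons x xs ih =>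
      by_cases h0 : b = 0
      · subst h0
        rw [slice?_cons_zero _ _ _ hst, ih (st - 1) (by omega)]
        simp only [Option.map_some, stride]
        rw [show (st - 1).toNat = st.toNat - 1 from by omega,
          show ((0 : Int)).toNat = 0 from rfl, if_pos rfl]
      · rw [slice?_cons_pos _ _ _ _ (by omega) hst, ih (b - 1) (by omega)]
        have : stride (x :: xs) b.toNat st.toNat = stride xs (b.toNat - 1) st.toNat := by
          simp [stride, show b.toNat ≠ 0 from by omega]
        rw [this, show (b - 1).toNat = b.toNat - 1 from by omega]

lemma off_step (it j m : Nat) (hit : it < m) (hj : j < m) :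
    off ((it + 1) % m) j m = if it = j then m - 1 else off it j m - 1 := by
  unfold off
  rcases Nat.lt_or_ge (it + 1) m with h | h
  · rw [Nat.mod_eq_of_lt h]; split_ifs <;> omega
  · rw [show it + 1 = m from by omega, Nat.mod_self]; split_ifs <;> omega

lemma getD_map_const {α β : Type} (l : List α) (c : β) (j : Nat) :
    (l.map (fun _ => c)).getD j c = c := by
  rw [List.getD_eq_getElem?_getD, List.getElem?_map]
  cases l[j]? <;> simp

lemma map_getD_range {α : Type} (l : List α) (d : α) :
    (List.range l.length).map (fun j => l.getD j d) = l := by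
  apply List.ext_getElem
  · simp
  · intro i h1 h2
    simp [List.getD_eq_getElem?_getD, List.getElem?_eq_getElem h2]

-- A's loop, characterised bucket-by-bucket: bucket j collects, in order, the items of l
-- at the positions its cyclic counter visits j on — a stride of step `chunks`
lemma foldA (chunks : Int) (l : List (String × List Int))
    (rl : List (PySem.Dict String (List Int))) (idx : Int)
    (hrl : rl.length = chunks.toNat) (h0 : 0 ≤ idx) (hlt : idx < chunks) :
    (l.foldl
      (fun (st : List (PySem.Dict String (List Int)) × Int) kv =>
        (st.1.modify st.2.toNat (fun d => d.insert kv.1 kv.2),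
         if st.2 < chunks - 1 then st.2 + 1 else 0))
      (rl, idx)).1
    = (List.range rl.length).map
        (fun j => insAll (rl.getD j PySem.Dict.empty)
          (stride l (off idx.toNat j chunks.toNat) chunks.toNat)) := by
  induction l generalizing rl idx with
  | nil =>
      simp only [List.foldl_nil, stride, insAll, List.foldl_nil]
      exact (map_getD_range rl PySem.Dict.empty).symm
  | cons x xs ih =>
      have hm : 0 < chunks := lt_of_le_of_lt h0 hlt
      have h0' : 0 ≤ (if idx < chunks - 1 then idx + 1 else 0) := by split <;> omega
      have hlt' : (if idx < chunks - 1 then idx + 1 else 0) < chunks := by split <;> omega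
      have hstep : (if idx < chunks - 1 then idx + 1 else 0).toNat
          = (idx.toNat + 1) % chunks.toNat := by
        split
        · rw [Nat.mod_eq_of_lt (by omega)]; omega
        · rw [show idx.toNat + 1 = chunks.toNat from by omega, Nat.mod_self]; omega
      rw [List.foldl_cons,
        ih (rl.modify idx.toNat (fun d => d.insert x.1 x.2)) _
          (by rw [List.length_modify]; exact hrl) h0' hlt',
        List.length_modify]
      apply List.map_congr_left
      intro j hj
      rw [List.mem_range] at hj
      have hit : idx.toNat < rl.length := by omega
      rw [List.getD_eq_getElem _ _ (by rw [List.length_modify]; exact hj),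
        List.getElem_modify, List.getD_eq_getElem _ _ hj, hstep,
        off_step idx.toNat j chunks.toNat (by omega) (by omega)]
      by_cases hej : idx.toNat = j
      · subst hej
        rw [if_pos rfl, if_pos rfl,
          show off idx.toNat idx.toNat chunks.toNat = 0 from by simp [off],
          show stride (x :: xs) 0 chunks.toNat
              = x :: stride xs (chunks.toNat - 1) chunks.toNat from by simp [stride]]
        simp [insAll]
      · have hoff : off idx.toNat j chunks.toNat ≠ 0 := by
          unfold off; split <;> omega
        rw [if_neg hej, if_neg hej,
          show stride (x :: xs) (off idx.toNat j chunks.toNat) chunks.toNat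
              = stride xs (off idx.toNat j chunks.toNat - 1) chunks.toNat
            from by simp [stride, hoff]]

-- ===== VERDICT (by name: the statement is the Claim_ definition above) =====
theorem splitIndex_spec : Claim_equal_splitIndex := by
  intro index chunks _ hpre
  show splitIndex index chunks = splitIndex_alt index chunks
  rcases hpre with hpos | hnil
  case inr =>
    subst hnil
    show (List.map PySem.Dict.items
        (List.foldl _ ((PySem.List.pyRange 0 chunks 1).map (fun _ => PySem.Dict.empty), 0) []).1)
      = _
    rw [List.foldl_nil]
    show _ = (PySem.List.pyRange 0 chunks 1).map (fun b =>
      (PySem.Dict.ofList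
        ((PySem.List.slice? ([] : List (String × List Int)) (some b) none chunks).getD [])).items)
    rw [List.map_map]
    apply List.map_congr_left
    intro b hb
    rw [PySem.List.mem_pyRange_one] at hb
    rw [slice?_eq_stride _ _ _ hb.1 (by omega)]
    rfl
  case inl =>
    obtain ⟨m, rfl⟩ : ∃ m : Nat, chunks = (m : Int) :=
      ⟨chunks.toNat, (Int.toNat_of_nonneg hpos.le).symm⟩
    have hm0 : 0 < m := by exact_mod_cast hpos
    show (List.map PySem.Dict.items
        (index.foldl
          (fun (st : List (PySem.Dict String (List Int)) × Int) kv =>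
            (st.1.modify st.2.toNat (fun d => d.insert kv.1 kv.2),
             if st.2 < (m : Int) - 1 then st.2 + 1 else 0))
          ((PySem.List.pyRange 0 (m : Int) 1).map (fun _ => PySem.Dict.empty), 0)).1)
      = splitIndex_alt index (m : Int)
    rw [foldA (m : Int) index _ 0 (by simp [PySem.List.length_pyRange_one]) le_rfl
      (by exact_mod_cast hm0)]
    show _ = (PySem.List.pyRange 0 (m : Int) 1).map (fun b =>
      (PySem.Dict.ofList ((PySem.List.slice? index (some b) none (m : Int)).getD [])).items)
    rw [PySem.List.pyRange_zero_nat m]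
    simp only [List.map_map, List.length_map, List.length_range]
    apply List.map_congr_left
    intro k hk
    rw [List.mem_range] at hk
    simp only [Function.comp_apply, Function.comp_def]
    rw [slice?_eq_stride index (k : Int) (m : Int) (Int.natCast_nonneg k) (by exact_mod_cast hm0)]
    rw [getD_map_const,
      show (((m : Int)).toNat) = m from Int.toNat_natCast m,
      show ((k : Int)).toNat = k from Int.toNat_natCast k, Int.toNat_zero,
      show off 0 k m = k from by simp [off]]
    rfl
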